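-- pv_equiv track=rewrite | github.com/Scprondation/Telegram-AI | app/responder.py | _parse_sticker_decision
-- ===== SOURCE A (Python) =====
-- from typing import Any
--
-- def _parse_sticker_decision(text: str) -> dict[str, Any]:
--     result: dict[str, Any] = {
--         "use": "no",
--         "candidate_id": None,
--         "mode": "none",
--         "reason": "",
--     }
--     for raw_line in text.splitlines():
--         line = raw_line.strip()
--         upper = line.upper()
--         if upper.startswith("USE:"):
--             value = line.split(":", 1)[1].strip().lower()
--             result["use"] = "yes" if value.startswith("y") or value == "да" else "no"
--         elif upper.startswith("ID:"):
--             value = line.split(":", 1)[1].strip()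
--             if value and value.lower() != "none":
--                 result["candidate_id"] = value
--         elif upper.startswith("MODE:"):
--             value = line.split(":", 1)[1].strip().lower()
--             if value in {"only", "after_text"}:
--                 result["mode"] = value
--         elif upper.startswith("REASON:"):
--             result["reason"] = line.split(":", 1)[1].strip()
--     return result
-- ===== SOURCE B (Python) =====
-- from typing import Any
--
--
-- def _parse_sticker_decision(text: str) -> dict[str, Any]:
--     # Four independent scans over the reversed stripped lines (first match =
--     # last-qualifying-wins), instead of one interleaved stateful loop.
--     rev = [line.strip() for line in reversed(text.splitlines())]
--
--     def val(line: str) -> str: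
--         return line.split(":", 1)[1].strip()
--
--     use_line = next((l for l in rev if l.upper().startswith("USE:")), None)
--     use = (
--         "yes"
--         if use_line is not None
--         and (val(use_line).lower().startswith("y") or val(use_line).lower() == "да")
--         else "no"
--     )
--     candidate_id = next(
--         (
--             val(l)
--             for l in rev
--             if l.upper().startswith("ID:") and val(l) and val(l).lower() != "none"
--         ),
--         None,
--     )
--     mode = next(
--         (
--             val(l).lower()
--             for l in rev
--             if l.upper().startswith("MODE:")
--             and val(l).lower() in ("only", "after_text")
--         ),
--         "none",
--     )
--     reason = next((val(l) for l in rev if l.upper().startswith("REASON:")), "")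
--     return {"use": use, "candidate_id": candidate_id, "mode": mode, "reason": reason}
-- ===== Notes on version B (the rewrite author's own statement) =====
-- stated objective: alternative
-- what changed: Replaces A's single interleaved stateful loop over the lines (a mutable 4-field dict updated by an elif chain) with four independent scans over the reversed stripped lines, each taking the first qualifying match per field (= last-qualifying-wins), proved equal via a fold/reversed-find invariant.
import Mathlib
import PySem

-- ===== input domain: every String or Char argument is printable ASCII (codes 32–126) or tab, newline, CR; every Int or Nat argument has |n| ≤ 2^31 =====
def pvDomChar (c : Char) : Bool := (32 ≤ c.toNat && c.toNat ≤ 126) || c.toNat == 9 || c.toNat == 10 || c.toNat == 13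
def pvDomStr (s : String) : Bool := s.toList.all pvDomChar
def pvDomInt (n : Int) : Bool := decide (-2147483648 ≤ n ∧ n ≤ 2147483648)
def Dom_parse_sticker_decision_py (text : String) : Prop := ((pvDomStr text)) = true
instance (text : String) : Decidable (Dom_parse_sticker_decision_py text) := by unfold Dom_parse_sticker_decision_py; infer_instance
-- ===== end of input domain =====

-- B replaces A's single interleaved stateful loop by four independent reversed
-- scans (first qualifying match per field = last-qualifying-wins); objective: alternative decomposition, same cost.


-- shared helper: line.split(":", 1)[1].strip() — both Pythons contain this exact
-- expression; the [1] index exists whenever the guarding startswith holds, so getD is exact there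
def pvAfterColon (line : List Char) : List Char :=
  PySem.Chars.strip ((PySem.Chars.splitOnMax line [':'] 1).getD 1 [])

-- ===== PORT A =====
-- A's loop body: one step of the interleaved elif chain over the mutable 4-field dict,
-- carried as the state (use, candidate_id, mode, reason)
def pvStepA (st : List Char × Option (List Char) × List Char × List Char)
    (raw_line : List Char) : List Char × Option (List Char) × List Char × List Char :=
  let line := PySem.Chars.strip raw_line
  let upper := PySem.Chars.upper line
  if PySem.Chars.startswith upper "USE:".toList then
    let value := PySem.Chars.lower (pvAfterColon line)
    ((if PySem.Chars.startswith value "y".toList || value == "да".toList then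
        "yes".toList else "no".toList), st.2.1, st.2.2.1, st.2.2.2)
  else if PySem.Chars.startswith upper "ID:".toList then
    let value := pvAfterColon line
    (st.1,
     (if !value.isEmpty && (PySem.Chars.lower value != "none".toList) then some value
      else st.2.1), st.2.2.1, st.2.2.2)
  else if PySem.Chars.startswith upper "MODE:".toList then
    let value := PySem.Chars.lower (pvAfterColon line)
    (st.1, st.2.1,
     (if value == "only".toList || value == "after_text".toList then value else st.2.2.1),
     st.2.2.2)
  else if PySem.Chars.startswith upper "REASON:".toList then
    (st.1, st.2.1, st.2.2.1, pvAfterColon line)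
  else st

def parse_sticker_decision_py (text : String) : List (String × Option String) :=
  let st := (PySem.Chars.splitlines text.toList).foldl pvStepA
      ("no".toList, none, "none".toList, ([] : List Char))
  [("use", some (String.ofList st.1)), ("candidate_id", st.2.1.map String.ofList),
   ("mode", some (String.ofList st.2.2.1)), ("reason", some (String.ofList st.2.2.2))]

-- ===== PORT B =====
-- B-side helpers: one reversed scan per field (l.upper().startswith(p) is the shared key test)
def pvKey (l p : List Char) : Bool := PySem.Chars.startswith (PySem.Chars.upper l) p

def pvUseOf (rev : List (List Char)) : List Char :=
  match rev.find? (fun l => pvKey l "USE:".toList) with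
  | some l =>
      if PySem.Chars.startswith (PySem.Chars.lower (pvAfterColon l)) "y".toList
          || PySem.Chars.lower (pvAfterColon l) == "да".toList then "yes".toList
      else "no".toList
  | none => "no".toList

def pvCandOf (rev : List (List Char)) : Option (List Char) :=
  (rev.find? (fun l => pvKey l "ID:".toList && !(pvAfterColon l).isEmpty
      && (PySem.Chars.lower (pvAfterColon l) != "none".toList))).map pvAfterColon

def pvModeOf (rev : List (List Char)) : List Char :=
  match rev.find? (fun l => pvKey l "MODE:".toList
      && (PySem.Chars.lower (pvAfterColon l) == "only".toList
          || PySem.Chars.lower (pvAfterColon l) == "after_text".toList)) with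
  | some l => PySem.Chars.lower (pvAfterColon l)
  | none => "none".toList

def pvReasonOf (rev : List (List Char)) : List Char :=
  ((rev.find? (fun l => pvKey l "REASON:".toList)).map pvAfterColon).getD []

def parse_sticker_decision_py_alt (text : String) : List (String × Option String) :=
  let rev := ((PySem.Chars.splitlines text.toList).map PySem.Chars.strip).reverse
  [("use", some (String.ofList (pvUseOf rev))), ("candidate_id", (pvCandOf rev).map String.ofList),
   ("mode", some (String.ofList (pvModeOf rev))), ("reason", some (String.ofList (pvReasonOf rev)))]

-- ===== PRECONDITION & SPEC =====
def Spec_parse_sticker_decision_py (text : String) (out : List (String × Option String)) : Prop := out = parse_sticker_decision_py_alt text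
instance (text : String) (out : List (String × Option String)) : Decidable (Spec_parse_sticker_decision_py text out) := by unfold Spec_parse_sticker_decision_py; infer_instance

-- ===== CLAIM (what is proved, stated in full; the proofs are below) =====
def Claim_equal_parse_sticker_decision_py : Prop := ∀ (text : String), Dom_parse_sticker_decision_py text → Spec_parse_sticker_decision_py text (parse_sticker_decision_py text)

-- ===== LEMMAS AND PROOFS =====

-- mutually non-prefix keys: a line matching one key matches no other
lemma pvKey_disj (s p q : List Char) (h : PySem.Chars.startswith s p = true)
    (hpq : ¬ p <+: q) (hqp : ¬ q <+: p) : PySem.Chars.startswith s q = false := by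
  rw [PySem.Chars.startswith_iff] at h
  by_contra hc
  rw [Bool.not_eq_false, PySem.Chars.startswith_iff] at hc
  rcases List.prefix_or_prefix_of_prefix h hc with h' | h' <;> [exact hpq h'; exact hqp h']

-- the invariant: A's fold over any line list computes B's four reversed scans
lemma pvFold_eq (ls : List (List Char)) :
    ls.foldl pvStepA ("no".toList, none, "none".toList, ([] : List Char)) =
      (pvUseOf ((ls.map PySem.Chars.strip).reverse),
       pvCandOf ((ls.map PySem.Chars.strip).reverse),
       pvModeOf ((ls.map PySem.Chars.strip).reverse),
       pvReasonOf ((ls.map PySem.Chars.strip).reverse)) := by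
  induction ls using List.reverseRecOn with
  | nil => rfl
  | append_singleton ls l ih =>
      rw [List.foldl_append, List.foldl_cons, List.foldl_nil, ih]
      simp only [List.map_append, List.map_cons, List.map_nil, List.reverse_append,
        List.reverse_cons, List.reverse_nil, List.nil_append, List.cons_append,
        pvStepA, pvUseOf, pvCandOf, pvModeOf, pvReasonOf, pvKey, List.find?_cons]
      generalize PySem.Chars.strip l = s
      by_cases hu : PySem.Chars.startswith (PySem.Chars.upper s) ['U','S','E',':'] = true
      · have h1 := pvKey_disj _ _ ['I','D',':'] hu (by decide) (by decide)
        have h2 := pvKey_disj _ _ ['M','O','D','E',':'] hu (by decide) (by decide)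
        have h3 := pvKey_disj _ _ ['R','E','A','S','O','N',':'] hu (by decide) (by decide)
        simp [hu, h1, h2, h3]
      · by_cases hi : PySem.Chars.startswith (PySem.Chars.upper s) ['I','D',':'] = true
        · have h2 := pvKey_disj _ _ ['M','O','D','E',':'] hi (by decide) (by decide)
          have h3 := pvKey_disj _ _ ['R','E','A','S','O','N',':'] hi (by decide) (by decide)
          by_cases hq : (!(pvAfterColon s).isEmpty
              && (PySem.Chars.lower (pvAfterColon s) != ['n','o','n','e'])) = true
          · simp [hu, hi, h2, h3, hq]
          · rw [Bool.not_eq_true] at hq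
            have hq' := hq
            simp only [Bool.and_eq_false_iff, bne_eq_false_iff_eq] at hq'
            rcases hq' with hq' | hq' <;> simp [hu, hi, h2, h3, hq']
        · by_cases hm : PySem.Chars.startswith (PySem.Chars.upper s) ['M','O','D','E',':'] = true
          · have h3 := pvKey_disj _ _ ['R','E','A','S','O','N',':'] hm (by decide) (by decide)
            by_cases hq : (PySem.Chars.lower (pvAfterColon s) == ['o','n','l','y']
                || PySem.Chars.lower (pvAfterColon s) == ['a','f','t','e','r','_','t','e','x','t']) = true
            · simp [hu, hi, hm, h3, hq]
            · rw [Bool.not_eq_true] at hq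
              simp [hu, hi, hm, h3, hq]
          · by_cases hr : PySem.Chars.startswith (PySem.Chars.upper s) ['R','E','A','S','O','N',':'] = true
            · simp [hu, hi, hm, hr]
            · simp [hu, hi, hm, hr]

-- ===== VERDICT (by name: the statement is the Claim_ definition above) =====
theorem parse_sticker_decision_py_spec : Claim_equal_parse_sticker_decision_py := by
  intro text _
  unfold Spec_parse_sticker_decision_py parse_sticker_decision_py parse_sticker_decision_py_alt
  rw [pvFold_eq]
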